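-- pv_equiv track=rewrite | github.com/springboardmentor969-cpu/AI-Agent-to-Test-Websites-Automatically-Using-Natural-Language | agent/instruction_parser.py | extract_credentials
-- ===== SOURCE A (Python) =====
-- def extract_credentials(text):
--     """Extract username and password from text"""
--     username = ""
--     password = ""
--
--     try:
--         parts = text.lower().split()
--
--         # Extract username
--         if "username" in text or "user" in text:
--             for i, word in enumerate(parts):
--                 if word in ["username", "user"]:
--                     username = parts[i + 1] if i + 1 < len(parts) else ""
--                     break
--
--         # Extract password
--         if "password" in text or "pass" in text:
--             for i, word in enumerate(parts):
--                 if word in ["password", "pass"]: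
--                     password = parts[i + 1] if i + 1 < len(parts) else ""
--                     break
--     except:
--         pass
--
--     return username, password
-- ===== SOURCE B (Python) =====
-- def extract_credentials(text):
--     """Extract username and password from text"""
--     username = ""
--     password = ""
--     try:
--         want_u = "username" in text or "user" in text
--         want_p = "password" in text or "pass" in text
--         parts = text.lower().split()
--         found_u = not want_u
--         found_p = not want_p
--         for i, word in enumerate(parts):
--             if found_u and found_p:
--                 break
--             if not found_u and word in ("username", "user"):
--                 username = parts[i + 1] if i + 1 < len(parts) else ""
--                 found_u = True
--             elif not found_p and word in ("password", "pass"):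
--                 password = parts[i + 1] if i + 1 < len(parts) else ""
--                 found_p = True
--     except:
--         pass
--     return username, password
-- ===== Notes on version B (the rewrite author's own statement) =====
-- stated objective: simpler
-- what changed: Replaces A's two separate full scans over the word list (one for username, one for password) by a single merged scan maintaining found_u/found_p flags with an early break once both are settled; the substring guards are precomputed as want flags before the loop.
import Mathlib
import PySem

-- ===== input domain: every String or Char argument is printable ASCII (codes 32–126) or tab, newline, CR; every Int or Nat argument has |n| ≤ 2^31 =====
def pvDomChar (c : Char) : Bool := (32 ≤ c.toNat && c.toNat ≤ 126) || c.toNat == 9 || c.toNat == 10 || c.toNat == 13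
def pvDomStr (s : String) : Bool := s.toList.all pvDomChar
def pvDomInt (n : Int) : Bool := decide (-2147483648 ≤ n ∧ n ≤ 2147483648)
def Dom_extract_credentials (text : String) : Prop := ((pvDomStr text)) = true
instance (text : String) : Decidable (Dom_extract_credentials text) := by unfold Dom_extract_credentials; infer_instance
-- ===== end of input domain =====

-- B replaces A's two separate keyword scans by one merged scan with found-flags and an
-- early break once both credentials are settled (objective: simpler single pass; same cost class).

-- ===== PORT A =====
-- A's 'for i, word in enumerate(parts): if word in keys: take parts[i+1] (or ""); break'
-- as structural recursion; the not-found case leaves the preset "" in place.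
def pvFindAfterA (keys : List String) : List String → String
  | [] => ""
  | w :: rest =>
    if keys.contains w then
      match rest with
      | [] => ""
      | nxt :: _ => nxt
    else pvFindAfterA keys rest

def extract_credentials (text : String) : String × String :=
  let parts := PySem.Str.split₀ (PySem.Str.lower text)
  let username :=
    if PySem.Str.isIn "username" text || PySem.Str.isIn "user" text then
      pvFindAfterA ["username", "user"] parts
    else ""
  let password :=
    if PySem.Str.isIn "password" text || PySem.Str.isIn "pass" text then
      pvFindAfterA ["password", "pass"] parts
    else ""
  (username, password)

-- ===== PORT B =====
-- Source B's single loop: state (username, password, found_u, found_p), break when both found.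
def pvScanB : List String → String → String → Bool → Bool → String × String
  | [], u, p, _, _ => (u, p)
  | w :: rest, u, p, fu, fp =>
    if fu && fp then (u, p)
    else if !fu && (w == "username" || w == "user") then
      pvScanB rest (match rest with | [] => "" | nxt :: _ => nxt) p true fp
    else if !fp && (w == "password" || w == "pass") then
      pvScanB rest u (match rest with | [] => "" | nxt :: _ => nxt) fu true
    else pvScanB rest u p fu fp

def extract_credentials_alt (text : String) : String × String :=
  let wantU := PySem.Str.isIn "username" text || PySem.Str.isIn "user" text
  let wantP := PySem.Str.isIn "password" text || PySem.Str.isIn "pass" text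
  let parts := PySem.Str.split₀ (PySem.Str.lower text)
  pvScanB parts "" "" (!wantU) (!wantP)

-- ===== PRECONDITION & SPEC =====
def Spec_extract_credentials (text : String) (out : String × String) : Prop := out = extract_credentials_alt text
instance (text : String) (out : String × String) : Decidable (Spec_extract_credentials text out) := by unfold Spec_extract_credentials; infer_instance

-- ===== CLAIM (what is proved, stated in full; the proofs are below) =====
def Claim_equal_extract_credentials : Prop := ∀ (text : String), Dom_extract_credentials text → Spec_extract_credentials text (extract_credentials text)

-- ===== LEMMAS AND PROOFS =====

-- the value of A's loop when the accumulator is kept general: unchanged if no keyword occurs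
def pvUpd (k1 k2 : String) (l : List String) (u : String) : String :=
  match l with
  | [] => u
  | w :: rest => if w == k1 || w == k2 then (match rest with | [] => "" | nxt :: _ => nxt) else pvUpd k1 k2 rest u

lemma pvUpd_empty_eq_findA (k1 k2 : String) (l : List String) :
    pvUpd k1 k2 l "" = pvFindAfterA [k1, k2] l := by
  induction l with
  | nil => rfl
  | cons w rest ih =>
    simp only [pvUpd, pvFindAfterA, List.contains_cons, List.contains_nil, Bool.or_false]
    split <;> simp_all

lemma pvScanB_eq (l : List String) : ∀ (u p : String) (fu fp : Bool),
    pvScanB l u p fu fp =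
      ((if fu then u else pvUpd "username" "user" l u),
       (if fp then p else pvUpd "password" "pass" l p)) := by
  induction l with
  | nil => intro u p fu fp; simp [pvScanB, pvUpd]
  | cons w rest ih =>
    intro u p fu fp
    by_cases hu : (w == "username" || w == "user") = true
    · have hp : (w == "password" || w == "pass") = false := by
        rcases Bool.or_eq_true .. |>.mp hu with h | h <;>
          rw [beq_iff_eq.mp h] <;> decide
      cases fu <;> cases fp <;> simp [pvScanB, pvUpd, hu, hp, ih]
    · by_cases hpw : (w == "password" || w == "pass") = true
      · cases fu <;> cases fp <;>
          simp [pvScanB, pvUpd, Bool.of_not_eq_true hu, hpw, ih]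
      · cases fu <;> cases fp <;>
          simp [pvScanB, pvUpd, Bool.of_not_eq_true hu, Bool.of_not_eq_true hpw, ih]

-- ===== VERDICT (by name: the statement is the Claim_ definition above) =====
theorem extract_credentials_spec : Claim_equal_extract_credentials := by
  intro text _
  unfold Spec_extract_credentials extract_credentials extract_credentials_alt
  rw [pvScanB_eq]
  cases hU : PySem.Str.isIn "username" text || PySem.Str.isIn "user" text <;>
  cases hP : PySem.Str.isIn "password" text || PySem.Str.isIn "pass" text <;>
    simp [pvUpd_empty_eq_findA]
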